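-- pv_equiv track=rewrite | github.com/KameshwaranMurugan333/CodeVita | GoodString.py | find_nearest_numbers
-- ===== SOURCE A (Python) =====
-- def find_nearest_numbers(target, number_array):
--     closest_numbers = []
--     min_difference = float('inf')
--
--     for number in number_array:
--         difference = abs(target - number)
--
--         if difference < min_difference:
--             # Found a new minimum difference, update the list
--             min_difference = difference
--             closest_numbers = [number]
--         elif difference == min_difference:
--             # Found another number with the same minimum difference
--             closest_numbers.append(number)
--
--     return closest_numbers
-- ===== SOURCE B (Python) =====
-- def find_nearest_numbers(target, number_array):
--     if not number_array:
--         return []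
--     min_difference = min(abs(target - n) for n in number_array)
--     return [n for n in number_array if abs(target - n) == min_difference]
-- ===== Notes on version B (the rewrite author's own statement) =====
-- stated objective: simpler
-- what changed: Replaces A's single track-and-reset loop (mutable minimum plus list reset/append) by a reduce-then-filter pair of passes: compute the minimum absolute difference, then filter the array for ties.
import Mathlib
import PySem

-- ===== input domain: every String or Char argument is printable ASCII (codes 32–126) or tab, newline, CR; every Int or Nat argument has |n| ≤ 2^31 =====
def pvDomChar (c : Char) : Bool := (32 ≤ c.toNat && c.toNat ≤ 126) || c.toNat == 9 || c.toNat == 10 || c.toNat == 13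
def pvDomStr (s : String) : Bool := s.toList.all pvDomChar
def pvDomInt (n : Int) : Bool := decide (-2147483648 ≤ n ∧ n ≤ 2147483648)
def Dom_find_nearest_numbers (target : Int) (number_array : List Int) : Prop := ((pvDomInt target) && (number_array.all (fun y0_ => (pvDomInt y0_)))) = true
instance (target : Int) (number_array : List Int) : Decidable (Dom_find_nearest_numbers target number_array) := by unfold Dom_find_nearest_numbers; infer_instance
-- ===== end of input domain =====

-- ===== PORT A =====
-- State: (closest_numbers, min_difference); `none` models float('inf').
def pvStepA (target : Int) (s : List Int × Option Int) (number : Int) : List Int × Option Int :=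
  let difference := |target - number|
  match s.2 with
  | none => ([number], some difference)
  | some m =>
    if difference < m then ([number], some difference)
    else if difference = m then (s.1 ++ [number], some m)
    else s

def find_nearest_numbers (target : Int) (number_array : List Int) : List Int :=
  (number_array.foldl (pvStepA target) ([], none)).1

-- ===== PORT B =====
def find_nearest_numbers_alt (target : Int) (number_array : List Int) : List Int :=
  match number_array with
  | [] => []
  | y :: ys =>
    let min_difference := ys.foldl (fun a n => min a |target - n|) |target - y|
    number_array.filter (fun n => |target - n| == min_difference)

-- ===== PRECONDITION & SPEC =====
def Spec_find_nearest_numbers (target : Int) (number_array : List Int) (out : List Int) : Prop := out = find_nearest_numbers_alt target number_array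
instance (target : Int) (number_array : List Int) (out : List Int) : Decidable (Spec_find_nearest_numbers target number_array out) := by unfold Spec_find_nearest_numbers; infer_instance

-- ===== CLAIM (what is proved, stated in full; the proofs are below) =====
def Claim_equal_find_nearest_numbers : Prop := ∀ (target : Int) (number_array : List Int), Dom_find_nearest_numbers target number_array → Spec_find_nearest_numbers target number_array (find_nearest_numbers target number_array)

-- ===== LEMMAS AND PROOFS =====

theorem pv_fold_min_le (target : Int) (xs : List Int) : ∀ (m : Int),
    xs.foldl (fun a n => min a |target - n|) m ≤ m := by
  induction xs with
  | nil => intro m; simp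
  | cons n rest ih =>
    intro m
    simp only [List.foldl_cons]
    exact le_trans (ih _) (min_le_left _ _)

theorem pv_foldA (target : Int) (xs : List Int) : ∀ (acc : List Int) (m : Int),
    xs.foldl (pvStepA target) (acc, some m) =
      ((if xs.foldl (fun a n => min a |target - n|) m < m then []
        else acc) ++ xs.filter (fun n => |target - n| == xs.foldl (fun a n => min a |target - n|) m),
       some (xs.foldl (fun a n => min a |target - n|) m)) := by
  induction xs with
  | nil => intro acc m; simp
  | cons n rest ih =>
    intro acc m
    have hle := pv_fold_min_le target rest
    simp only [List.foldl_cons, List.filter_cons]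
    by_cases h1 : |target - n| < m
    · have hmin : min m |target - n| = |target - n| := by omega
      simp only [pvStepA, h1, if_pos, hmin]
      rw [ih]
      have hle' := hle |target - n|
      set m' := rest.foldl (fun a n => min a |target - n|) |target - n| with hm'
      have hlt : m' < m := by omega
      simp only [hlt, if_pos]
      by_cases h2 : m' < |target - n|
      · have : (|target - n| == m') = false := by simp; omega
        simp [h2, this]
      · have he : m' = |target - n| := by omega
        have : (|target - n| == m') = true := by simp [he]
        simp [h2, this]
    · by_cases h2 : |target - n| = m
      · have hmin : min m |target - n| = m := by omega
        simp only [pvStepA, h2, lt_irrefl, min_self, if_false, if_true]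
        rw [ih]
        have hle' := hle m
        set m' := rest.foldl (fun a n => min a |target - n|) m with hm'
        by_cases h3 : m' < m
        · simp [h3]; omega
        · have he : m' = m := by omega
          simp [h3]; omega
      · have hmin : min m |target - n| = m := by omega
        simp only [pvStepA, h1, if_neg, not_false_iff, h2, hmin]
        rw [ih]
        have hle' := hle m
        set m' := rest.foldl (fun a n => min a |target - n|) m with hm'
        have : (|target - n| == m') = false := by simp; omega
        simp [this]

-- ===== VERDICT (by name: the statement is the Claim_ definition above) =====
theorem find_nearest_numbers_spec : Claim_equal_find_nearest_numbers := by
  intro target number_array _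
  unfold Spec_find_nearest_numbers find_nearest_numbers find_nearest_numbers_alt
  match number_array with
  | [] => rfl
  | y :: ys =>
    simp only [List.foldl_cons, pvStepA, List.filter_cons]
    rw [pv_foldA]
    have hle := pv_fold_min_le target ys |target - y|
    set m' := ys.foldl (fun a n => min a |target - n|) |target - y| with hm'
    by_cases h : m' < |target - y|
    · have : (|target - y| == m') = false := by simp; omega
      simp [h, this]
    · have he : m' = |target - y| := by omega
      have : (|target - y| == m') = true := by simp [he]
      simp [h, this]
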